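-- pv_equiv track=rewrite | github.com/OGalOz/rbts_mts_visualize_pool | lib/src/ScfPosBC_To_BarChartData.py | GetTickValues
-- ===== SOURCE A (Python) =====
-- def GetTickValues(start_val, end_val, subdivs):
--     """We go from a value and subdivs to actual graph ticks
--
--     Args:
--         start_val: (int)
--         end_val: (int)
--         subdivs: (int)
--
--     Returns:
--         ticks_list = [[start_val, start_val + subdivs], [start_val + subdivs,...]
--
--     Specifically, this function starts from start_val and adds subdiv until reaching
--         end_val. Note that difference between start_val and end_val does not
--         need t
--     """
--     # First we get a list of just each tick, not the start and end ticks (no dbl)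
--     init_tick_list = [start_val]
--
--     crnt_val = start_val + subdivs
--
--     while crnt_val < end_val:
--         init_tick_list.append(crnt_val)
--         crnt_val = crnt_val + subdivs
--
--     init_tick_list.append(end_val)
--
--     # Now we make list with starts and ends
--     ticks_list = []
--     # Note init_tick_list has at least 2 values
--     for i in range(len(init_tick_list) - 1):
--         ticks_list.append([init_tick_list[i], init_tick_list[i+1]])
--
--     return ticks_list
-- ===== SOURCE B (Python) =====
-- def GetTickValues(start_val, end_val, subdivs):
--     # Single fused pass: maintain the previous boundary instead of building
--     # the intermediate tick list and then pairing it up.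
--     ticks_list = []
--     prev = start_val
--     crnt = start_val + subdivs
--     while crnt < end_val:
--         ticks_list.append([prev, crnt])
--         prev = crnt
--         crnt = crnt + subdivs
--     ticks_list.append([prev, end_val])
--     return ticks_list
-- ===== Notes on version B (the rewrite author's own statement) =====
-- stated objective: simpler
-- what changed: Fuses A's two phases (build boundary list, then pair consecutive entries by index) into one loop that emits each [prev, crnt] interval directly while tracking the previous boundary.
import Mathlib
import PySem

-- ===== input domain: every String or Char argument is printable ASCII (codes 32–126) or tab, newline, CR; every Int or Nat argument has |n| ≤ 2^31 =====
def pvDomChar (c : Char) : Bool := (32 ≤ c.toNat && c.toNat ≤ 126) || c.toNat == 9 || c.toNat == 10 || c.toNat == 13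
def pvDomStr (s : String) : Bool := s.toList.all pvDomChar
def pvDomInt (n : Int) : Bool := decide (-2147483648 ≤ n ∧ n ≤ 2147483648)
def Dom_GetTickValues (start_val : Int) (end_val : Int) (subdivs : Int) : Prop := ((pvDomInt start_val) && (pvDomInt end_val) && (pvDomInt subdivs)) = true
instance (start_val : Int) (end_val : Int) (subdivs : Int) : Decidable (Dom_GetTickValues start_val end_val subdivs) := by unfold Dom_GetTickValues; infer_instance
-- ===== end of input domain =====

-- B fuses A's two phases (build boundary list, then pair consecutive entries) into one
-- loop that emits each [prev, crnt] interval directly (objective: simpler).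

-- ===== PORT A =====
-- the `while crnt_val < end_val` loop collecting interior ticks; the `0 < subdivs`
-- guard only makes the recursion total — where it fails with crnt < end_val the
-- Python loop diverges and neither Python version returns a value
def pvInitLoop (end_val : Int) (subdivs : Int) (crnt : Int) : List Int :=
  if _h : crnt < end_val ∧ 0 < subdivs then
    crnt :: pvInitLoop end_val subdivs (crnt + subdivs)
  else []
termination_by (end_val - crnt).toNat
decreasing_by omega

def GetTickValues (start_val : Int) (end_val : Int) (subdivs : Int) : List (List Int) :=
  -- init_tick_list = [start_val] ++ interior ticks ++ [end_val]
  let init_tick_list := (start_val :: pvInitLoop end_val subdivs (start_val + subdivs)) ++ [end_val]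
  -- for i in range(len(init_tick_list) - 1): ticks_list.append([l[i], l[i+1]])
  -- (indices are always in range, so pyGetD's default 0 is never used)
  (PySem.List.pyRange 0 ((init_tick_list.length : Int) - 1) 1).foldl
    (fun acc i => acc ++ [[PySem.List.pyGetD init_tick_list i 0,
                           PySem.List.pyGetD init_tick_list (i + 1) 0]]) []

-- ===== PORT B =====
-- the fused `while crnt < end_val` loop of Source B, carrying prev; same totality guard
def pvAltLoop (end_val : Int) (subdivs : Int) (prev : Int) (crnt : Int) : List (List Int) :=
  if _h : crnt < end_val ∧ 0 < subdivs then
    [prev, crnt] :: pvAltLoop end_val subdivs crnt (crnt + subdivs)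
  else [[prev, end_val]]
termination_by (end_val - crnt).toNat
decreasing_by omega

def GetTickValues_alt (start_val : Int) (end_val : Int) (subdivs : Int) : List (List Int) :=
  pvAltLoop end_val subdivs start_val (start_val + subdivs)

-- ===== PRECONDITION & SPEC =====
-- no Pre_: both ports are total; where Python's while loop would not terminate
-- (subdivs <= 0 with start_val + subdivs < end_val) neither Python returns a value
def Spec_GetTickValues (start_val : Int) (end_val : Int) (subdivs : Int) (out : List (List Int)) : Prop := out = GetTickValues_alt start_val end_val subdivs
instance (start_val : Int) (end_val : Int) (subdivs : Int) (out : List (List Int)) : Decidable (Spec_GetTickValues start_val end_val subdivs out) := by unfold Spec_GetTickValues; infer_instance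

-- ===== CLAIM (what is proved, stated in full; the proofs are below) =====
def Claim_equal_GetTickValues : Prop := ∀ (start_val : Int) (end_val : Int) (subdivs : Int), Dom_GetTickValues start_val end_val subdivs → Spec_GetTickValues start_val end_val subdivs (GetTickValues start_val end_val subdivs)

-- ===== LEMMAS AND PROOFS =====

-- consecutive pairs of a list, as A's second phase produces them
def pvPairs (l : List Int) : List (List Int) :=
  (l.zip l.tail).map (fun p => [p.1, p.2])

theorem pvPairs_cons (a b : Int) (t : List Int) :
    pvPairs (a :: b :: t) = [a, b] :: pvPairs (b :: t) := by
  simp [pvPairs]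

-- A's indexed pairing fold equals pvPairs
theorem pvFold_eq_pairs (l : List Int) :
    (PySem.List.pyRange 0 ((l.length : Int) - 1) 1).foldl
      (fun acc i => acc ++ [[PySem.List.pyGetD l i 0, PySem.List.pyGetD l (i + 1) 0]]) []
      = pvPairs l := by
  rw [PySem.List.foldl_append_singleton_eq_map]
  apply List.ext_getElem
  · simp [pvPairs, PySem.List.length_pyRange_one]
  · intro k h1 h2
    have hk : k < l.length - 1 := by
      simp only [List.nil_append, List.length_map, PySem.List.length_pyRange_one] at h1
      omega
    simp only [List.nil_append, List.getElem_map, PySem.List.getElem_pyRange_one, zero_add]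
    have e1 : PySem.List.pyGetD l (k : Int) 0 = l[k]'(by omega) := by
      rw [PySem.List.pyGetD_natCast]
      exact List.getD_eq_getElem l 0 (by omega)
    have e2 : PySem.List.pyGetD l ((k : Int) + 1) 0 = l[k + 1]'(by omega) := by
      have h : ((k : Int) + 1) = ((k + 1 : Nat) : Int) := by push_cast; ring
      rw [h, PySem.List.pyGetD_natCast]
      exact List.getD_eq_getElem l 0 (by omega)
    simp [pvPairs, e1, e2, List.getElem_tail]

-- pairing A's boundary list equals B's fused loop
theorem pvPairs_initLoop (end_val subdivs : Int) : ∀ (crnt prev : Int),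
    pvPairs ((prev :: pvInitLoop end_val subdivs crnt) ++ [end_val])
      = pvAltLoop end_val subdivs prev crnt := by
  intro crnt
  induction crnt using pvInitLoop.induct end_val subdivs with
  | case1 crnt h ih =>
    intro prev
    rw [pvInitLoop, pvAltLoop, dif_pos h, dif_pos h]
    simp only [List.cons_append]
    rw [pvPairs_cons]
    rw [← List.cons_append, ih crnt]
  | case2 crnt h =>
    intro prev
    rw [pvInitLoop, pvAltLoop, dif_neg h, dif_neg h]
    simp [pvPairs]

-- ===== VERDICT (by name: the statement is the Claim_ definition above) =====
theorem GetTickValues_spec : Claim_equal_GetTickValues := by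
  intro s e d _
  unfold Spec_GetTickValues GetTickValues GetTickValues_alt
  rw [pvFold_eq_pairs, pvPairs_initLoop]
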